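-- pv_equiv track=rewrite | github.com/zyune/my_ltcd_slt | test_1.py | raspberries
-- ===== SOURCE A (Python) =====
-- def raspberries(bushes):
--
--     stuck = 0
--
--     many = 0
--
--     for i in range(bushes):
--
--         many += 10
--
--         if i % 4 == 0:
--
--             stuck += 1
--
--     return (stuck, many)
-- ===== SOURCE B (Python) =====
-- def raspberries(bushes):
--     n = max(bushes, 0)
--     return ((n + 3) // 4, 10 * n)
-- ===== Notes on version B (the rewrite author's own statement) =====
-- stated objective: faster
-- what changed: Replaces the linear counting loop by closed-form arithmetic: ceiling division of the bush count for stuck and a constant multiple for many, clamped at zero for negative input.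
import Mathlib
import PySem

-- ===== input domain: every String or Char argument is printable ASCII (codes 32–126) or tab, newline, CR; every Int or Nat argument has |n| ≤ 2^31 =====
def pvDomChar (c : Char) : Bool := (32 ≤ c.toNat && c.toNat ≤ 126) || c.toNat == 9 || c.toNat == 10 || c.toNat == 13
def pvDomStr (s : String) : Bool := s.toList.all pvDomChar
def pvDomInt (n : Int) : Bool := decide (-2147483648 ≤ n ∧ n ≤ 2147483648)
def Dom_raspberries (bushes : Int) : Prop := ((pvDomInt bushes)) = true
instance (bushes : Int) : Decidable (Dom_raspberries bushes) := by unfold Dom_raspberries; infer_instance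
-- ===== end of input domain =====

-- B replaces A's O(n) counting loop by the closed form ((n+3)//4, 10*n): faster (asymptotic).


-- ===== PORT A =====
def raspberries (bushes : Int) : List Int :=
  let r := (PySem.List.pyRange 0 bushes 1).foldl
    (fun (st : Int × Int) i =>
      let many := st.2 + 10
      let stuck := if PySem.Int.mod i 4 == 0 then st.1 + 1 else st.1
      (stuck, many)) (0, 0)
  [r.1, r.2]

-- ===== PORT B =====
def raspberries_alt (bushes : Int) : List Int :=
  let n := max bushes 0
  [PySem.Int.floordiv (n + 3) 4, 10 * n]

-- ===== PRECONDITION & SPEC =====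
def Spec_raspberries (bushes : Int) (out : List Int) : Prop := out = raspberries_alt bushes
instance (bushes : Int) (out : List Int) : Decidable (Spec_raspberries bushes out) := by unfold Spec_raspberries; infer_instance

-- ===== CLAIM (what is proved, stated in full; the proofs are below) =====
def Claim_equal_raspberries : Prop := ∀ (bushes : Int), Dom_raspberries bushes → Spec_raspberries bushes (raspberries bushes)

-- ===== LEMMAS AND PROOFS =====

-- The loop state after the whole range [0, n): closed form for both components.
theorem raspberries_fold (n : Nat) :
    (PySem.List.pyRange 0 (n : Int) 1).foldl
      (fun (st : Int × Int) i =>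
        let many := st.2 + 10
        let stuck := if PySem.Int.mod i 4 == 0 then st.1 + 1 else st.1
        (stuck, many)) (0, 0)
    = (((n : Int) + 3) / 4, 10 * (n : Int)) := by
  induction n with
  | zero => simp [PySem.List.pyRange_one_eq_nil]
  | succ m ih =>
      have h : (((m : Nat) + 1 : Nat) : Int) = (m : Int) + 1 := by push_cast; ring
      rw [h, PySem.List.pyRange_one_succ_right (by positivity), List.foldl_append, ih]
      simp only [List.foldl_cons, List.foldl_nil]
      have hmod : PySem.Int.mod (m : Int) 4 = (m : Int) % 4 :=
        PySem.Int.mod_eq_emod_of_pos (by norm_num)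
      by_cases hm : (m : Int) % 4 = 0 <;>
        simp [hmod, hm] <;> constructor <;> omega

theorem raspberries_eq (bushes : Int) : raspberries bushes = raspberries_alt bushes := by
  unfold raspberries raspberries_alt
  by_cases h : bushes ≤ 0
  · rw [PySem.List.pyRange_one_eq_nil h]
    have : max bushes 0 = 0 := by omega
    simp [this]
  · obtain ⟨n, rfl⟩ : ∃ n : Nat, bushes = (n : Int) :=
      ⟨bushes.toNat, (Int.toNat_of_nonneg (by omega)).symm⟩
    rw [raspberries_fold]
    have hmax : max (n : Int) 0 = (n : Int) := by omega
    have hfd : PySem.Int.floordiv ((n : Int) + 3) 4 = ((n : Int) + 3) / 4 :=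
      PySem.Int.floordiv_eq_ediv_of_pos (by norm_num)
    simp [hmax, hfd]

-- ===== VERDICT (by name: the statement is the Claim_ definition above) =====
theorem raspberries_spec : Claim_equal_raspberries := by
  intro bushes _
  exact raspberries_eq bushes
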